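-- pv_equiv track=rewrite | github.com/balaji97/DiemTwins | src/test_generator.py | permutations_with_replacement
-- ===== SOURCE A (Python) =====
-- def permutations_with_replacement(n, k, permutations):
--     m = 0
--     if k < 1:
--         return permutations
--
--     for i in range(27):
--         permutations[i].append(m % n)
--         if (i % n ** (k - 1)) == n ** (k - 1) - 1:
--             m = m + 1
--
--     return permutations_with_replacement(n, k - 1, permutations)
-- ===== SOURCE B (Python) =====
-- def _column_digit(n, kk, i):
--     d = n ** (kk - 1)
--     m = sum(1 for j in range(i) if j % d == d - 1)
--     return m % n
--
--
-- def permutations_with_replacement(n, k, permutations):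
--     if k < 1:
--         return permutations
--     for i in range(27):
--         row = permutations[i]
--         row.extend(_column_digit(n, kk, i) for kk in range(k, 0, -1))
--     return permutations
-- ===== Notes on version B (the rewrite author's own statement) =====
-- stated objective: alternative
-- what changed: Replaces A's tail recursion over digit levels with its running carry counter m by a single row-wise pass that extends each row with all of its digits at once, computing each digit directly as a count of carry positions below the row index.
import Mathlib
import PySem

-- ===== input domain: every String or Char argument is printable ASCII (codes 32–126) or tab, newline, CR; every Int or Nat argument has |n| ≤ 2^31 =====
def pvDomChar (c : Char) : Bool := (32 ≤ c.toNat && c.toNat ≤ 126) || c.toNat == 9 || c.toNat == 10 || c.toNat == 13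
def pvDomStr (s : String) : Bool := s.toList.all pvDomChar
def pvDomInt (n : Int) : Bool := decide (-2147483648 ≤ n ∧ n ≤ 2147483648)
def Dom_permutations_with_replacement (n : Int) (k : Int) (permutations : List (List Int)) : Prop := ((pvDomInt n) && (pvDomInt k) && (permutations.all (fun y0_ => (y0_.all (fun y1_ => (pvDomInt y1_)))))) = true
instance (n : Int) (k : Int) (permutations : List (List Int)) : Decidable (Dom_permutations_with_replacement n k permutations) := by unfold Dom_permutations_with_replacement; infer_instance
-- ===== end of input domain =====

-- B replaces A's tail recursion over levels (with a running carry counter m) by a single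
-- row-wise pass that computes each digit directly as a count; objective: alternative
-- decomposition, not faster. Python A and B mutate `permutations` in place; the
-- equivalence proved here is about the return value.

-- ===== PORT A =====
def permutations_with_replacement (n : Int) (k : Int) (permutations : List (List Int)) : List (List Int) :=
  if k < 1 then permutations
  else
    let st := (List.range 27).foldl
      (fun (st : List (List Int) × Int) (i : Nat) =>
        let p' := st.1.modify i (fun row => row ++ [PySem.Int.mod st.2 n])
        if PySem.Int.mod (i : Int) (n ^ (k - 1).toNat) = n ^ (k - 1).toNat - 1
        then (p', st.2 + 1) else (p', st.2))
      (permutations, 0)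
    permutations_with_replacement n (k - 1) st.1
termination_by k.toNat
decreasing_by omega

-- ===== PORT B =====
def columnDigit (n : Int) (kk : Int) (i : Nat) : Int :=
  let d := n ^ (kk - 1).toNat
  let m : Int := (((List.range i).filter (fun j => decide (PySem.Int.mod (j : Int) d = d - 1))).length : Int)
  PySem.Int.mod m n

def permutations_with_replacement_alt (n : Int) (k : Int) (permutations : List (List Int)) : List (List Int) :=
  if k < 1 then permutations
  else
    (List.range 27).foldl
      (fun p (i : Nat) =>
        p.modify i (fun row => row ++ (PySem.List.pyRange k 0 (-1)).map (fun kk => columnDigit n kk i)))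
      permutations

-- ===== PRECONDITION & SPEC =====
-- Exactly the inputs on which the Python A returns: for k ≥ 1 it needs n ≠ 0 (else m % n
-- raises ZeroDivisionError) and at least 27 rows (else permutations[i] raises IndexError).
def Pre_permutations_with_replacement (n : Int) (k : Int) (permutations : List (List Int)) : Prop :=
  k < 1 ∨ (n ≠ 0 ∧ 27 ≤ permutations.length)
instance (n : Int) (k : Int) (permutations : List (List Int)) : Decidable (Pre_permutations_with_replacement n k permutations) := by unfold Pre_permutations_with_replacement; infer_instance

def pvWitness_permutations_with_replacement : Int × Int × List (List Int) :=
  (2, 2, [[], [], [], [], [], [], [], [], [], [], [], [], [], [], [], [], [], [], [], [], [], [], [], [], [], [], []])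

def Spec_permutations_with_replacement (n : Int) (k : Int) (permutations : List (List Int)) (out : List (List Int)) : Prop := out = permutations_with_replacement_alt n k permutations
instance (n : Int) (k : Int) (permutations : List (List Int)) (out : List (List Int)) : Decidable (Spec_permutations_with_replacement n k permutations out) := by unfold Spec_permutations_with_replacement; infer_instance

-- ===== CLAIM (what is proved, stated in full; the proofs are below) =====
def Claim_equal_permutations_with_replacement : Prop := ∀ (n : Int) (k : Int) (permutations : List (List Int)), Dom_permutations_with_replacement n k permutations → Pre_permutations_with_replacement n k permutations → Spec_permutations_with_replacement n k permutations (permutations_with_replacement n k permutations)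

-- ===== LEMMAS AND PROOFS =====

-- the running counter m of A, expressed as the count B computes
def cnt (d : Int) (i : Nat) : Int :=
  (((List.range i).filter (fun j => decide (PySem.Int.mod (j : Int) d = d - 1))).length : Int)

lemma cnt_succ (d : Int) (s : Nat) :
    cnt d (s + 1) = if PySem.Int.mod (s : Int) d = d - 1 then cnt d s + 1 else cnt d s := by
  simp [cnt, List.range_succ, List.filter_append]
  split_ifs with h <;> simp [h]

-- one level of A's fold, with the accumulator replaced by cnt
lemma foldA_eq (n d : Int) :
    ∀ (len s : Nat) (p : List (List Int)),
      (List.range' s len).foldl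
        (fun (st : List (List Int) × Int) (i : Nat) =>
          let p' := st.1.modify i (fun row => row ++ [PySem.Int.mod st.2 n])
          if PySem.Int.mod (i : Int) d = d - 1 then (p', st.2 + 1) else (p', st.2))
        (p, cnt d s)
      = ((List.range' s len).foldl
          (fun p (i : Nat) => p.modify i (fun row => row ++ [PySem.Int.mod (cnt d i) n])) p,
         cnt d (s + len)) := by
  intro len
  induction len with
  | zero => intro s p; simp
  | succ m ih =>
      intro s p
      rw [List.range'_succ]
      simp only [List.foldl_cons]
      by_cases h : PySem.Int.mod (s : Int) d = d - 1
      · have hc : cnt d s + 1 = cnt d (s + 1) := by rw [cnt_succ]; simp [h]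
        simp only [h, if_pos, hc]
        rw [ih (s + 1)]
        have hadd : s + 1 + m = s + (m + 1) := by omega
        rw [hadd]
      · have hc : cnt d s = cnt d (s + 1) := by rw [cnt_succ]; simp [h]
        simp only [h, ite_false, hc]
        rw [ih (s + 1)]
        have hadd : s + 1 + m = s + (m + 1) := by omega
        rw [hadd]

-- characterization of a fold that appends t i to row i, via getElem?
lemma foldmod_getElem? (t : Nat → List Int) :
    ∀ (N : Nat) (p : List (List Int)) (j : Nat),
      ((List.range N).foldl (fun p (i : Nat) => p.modify i (fun row => row ++ t i)) p)[j]?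
        = if j < N then (p[j]?).map (fun row => row ++ t j) else p[j]? := by
  intro N
  induction N with
  | zero => intro p j; simp
  | succ m ih =>
      intro p j
      rw [List.range_succ, List.foldl_append]
      simp only [List.foldl_cons, List.foldl_nil]
      rw [List.getElem?_modify, ih p j]
      by_cases hj : j = m
      · subst hj
        cases p[j]? <;> simp
      · by_cases h1 : j < m
        · cases p[j]? <;> simp [h1, Nat.lt_succ_of_lt h1, Ne.symm hj]
        · have h2 : ¬ j < m + 1 := by omega
          cases p[j]? <;> simp [h1, h2, Ne.symm hj]

lemma pyRange_countdown_one : PySem.List.pyRange 1 0 (-1) = [1] := by decide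

-- peeling one level off B
lemma B_step (n k : Int) (p : List (List Int)) (hk : 1 ≤ k) :
    permutations_with_replacement_alt n k p
      = permutations_with_replacement_alt n (k - 1)
          ((List.range 27).foldl
            (fun p (i : Nat) => p.modify i (fun row => row ++ [columnDigit n k i])) p) := by
  have hcons : PySem.List.pyRange k 0 (-1) = k :: PySem.List.pyRange (k - 1) 0 (-1) :=
    PySem.List.pyRange_neg_one_cons (by omega)
  by_cases hk1 : k - 1 < 1
  · -- k = 1: the remaining range is empty
    have hk' : k = 1 := by omega
    subst hk'
    rw [permutations_with_replacement_alt, permutations_with_replacement_alt]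
    simp only [show ¬ (1 : Int) < 1 by omega, if_false, show (1 : Int) - 1 < 1 by omega, if_true]
    apply List.ext_getElem?
    intro j
    rw [foldmod_getElem?, foldmod_getElem?]
    simp [pyRange_countdown_one]
  · rw [permutations_with_replacement_alt, permutations_with_replacement_alt]
    simp only [show ¬ k < 1 by omega, show ¬ k - 1 < 1 by omega, if_false]
    apply List.ext_getElem?
    intro j
    rw [foldmod_getElem?, foldmod_getElem?]
    by_cases hj : j < 27
    · simp only [hj, if_true]
      rw [foldmod_getElem?]
      simp only [hj, if_true, hcons, List.map_cons]
      cases p[j]? <;> simp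
    · simp only [hj, if_false]
      rw [foldmod_getElem?]
      simp [hj]

lemma main_eq (n : Int) :
    ∀ (K : Nat) (k : Int), k.toNat = K → ∀ (p : List (List Int)),
      permutations_with_replacement n k p = permutations_with_replacement_alt n k p := by
  intro K
  induction K with
  | zero =>
      intro k hK p
      have hk : k < 1 := by omega
      rw [permutations_with_replacement, permutations_with_replacement_alt]
      simp [hk]
  | succ m ih =>
      intro k hK p
      have hk : 1 ≤ k := by omega
      rw [permutations_with_replacement]
      simp only [show ¬ k < 1 by omega, if_false]
      have h0 : (0 : Int) = cnt (n ^ (k - 1).toNat) 0 := rfl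
      rw [show (List.range 27) = List.range' 0 27 from List.range_eq_range', h0,
        foldA_eq n (n ^ (k - 1).toNat) 27 0 p]
      have hcd : (fun (p : List (List Int)) (i : Nat) =>
            p.modify i (fun row => row ++ [PySem.Int.mod (cnt (n ^ (k - 1).toNat) i) n]))
          = (fun (p : List (List Int)) (i : Nat) => p.modify i (fun row => row ++ [columnDigit n k i])) := rfl
      simp only [hcd]
      rw [ih (k - 1) (by omega), B_step n k p hk,
        show (List.range 27) = List.range' 0 27 from List.range_eq_range']

-- ===== VERDICT (by name: the statement is the Claim_ definition above) =====
theorem permutations_with_replacement_spec : Claim_equal_permutations_with_replacement := by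
  intro n k p _ _
  unfold Spec_permutations_with_replacement
  exact main_eq n k.toNat k rfl p
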